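-- pv_equiv track=rewrite | github.com/sign-language-translator/sign-language-translator | sign_language_translator/utils/utils.py | search_in_values_to_retrieve_key
-- ===== SOURCE A (Python) =====
-- from typing import Any, Dict, List, Set, Union
--
-- def search_in_values_to_retrieve_key(
--     code_name: str, class_to_codes: Dict[Any, Set[str]]
-- ):
--     # verify there is no repetition/reuse in language codes
--     all_codes = [code for codes in class_to_codes.values() for code in codes]
--     assert len(all_codes) == len(set(all_codes)), "code reused for multiple keys"
--
--     for key, codes in class_to_codes.items():
--         if code_name.lower() in codes:
--             return key
--
--     return None
-- ===== SOURCE B (Python) =====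
-- def search_in_values_to_retrieve_key(code_name, class_to_codes):
--     # build an inverse code -> key index once, checking uniqueness as we go
--     inverse = {}
--     for key, codes in class_to_codes.items():
--         for code in codes:
--             assert code not in inverse, "code reused for multiple keys"
--             inverse[code] = key
--     return inverse.get(code_name.lower())
-- ===== Notes on version B (the rewrite author's own statement) =====
-- stated objective: simpler
-- what changed: Replaces A's flatten-then-set uniqueness check plus a linear scan over items by a single pass that builds an inverse code->key dict (asserting on reuse inline) followed by one O(1) lookup.
import Mathlib
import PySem

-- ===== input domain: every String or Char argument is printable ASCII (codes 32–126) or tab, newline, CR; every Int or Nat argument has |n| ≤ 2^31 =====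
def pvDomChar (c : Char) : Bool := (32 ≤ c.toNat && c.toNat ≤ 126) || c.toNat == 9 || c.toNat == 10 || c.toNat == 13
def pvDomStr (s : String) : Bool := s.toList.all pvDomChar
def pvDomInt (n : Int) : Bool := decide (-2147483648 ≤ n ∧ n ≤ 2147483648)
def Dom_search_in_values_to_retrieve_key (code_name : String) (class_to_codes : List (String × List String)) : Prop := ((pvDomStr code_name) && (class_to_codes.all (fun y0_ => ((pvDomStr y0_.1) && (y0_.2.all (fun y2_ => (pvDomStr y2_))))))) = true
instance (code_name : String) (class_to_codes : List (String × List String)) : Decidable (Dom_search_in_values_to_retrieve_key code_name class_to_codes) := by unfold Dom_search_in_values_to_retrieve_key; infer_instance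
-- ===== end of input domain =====

-- B replaces A's flatten+set uniqueness check and linear scan by one inverse-index
-- building pass and a single dict lookup (objective: simpler). Both raise the same
-- AssertionError on reused codes; those inputs are excluded by Pre_.

-- ===== PORT A =====
-- the for-loop over items: first key whose code set contains c
def pvScanA (c : String) : List (String × List String) → Option String
  | [] => none
  | (key, codes) :: rest => if c ∈ codes then some key else pvScanA c rest

def search_in_values_to_retrieve_key (code_name : String) (class_to_codes : List (String × List String)) : Option String :=
  -- all_codes + assert: raises unless the flattened codes are duplicate-free (Pre_)
  pvScanA (PySem.Str.lower code_name) class_to_codes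

-- ===== PORT B =====
-- the index-building double loop (the assert never fires inside Pre_)
def pvBuildInverse (class_to_codes : List (String × List String)) : PySem.Dict String String :=
  class_to_codes.foldl (fun d kv => kv.2.foldl (fun d code => d.insert code kv.1) d) PySem.Dict.empty

def search_in_values_to_retrieve_key_alt (code_name : String) (class_to_codes : List (String × List String)) : Option String :=
  (pvBuildInverse class_to_codes).get? (PySem.Str.lower code_name)

-- ===== PRECONDITION & SPEC =====
-- Pre_ excludes exactly the inputs where A's assert raises AssertionError
-- ("code reused for multiple keys"): a code occurring in two value sets.
def Pre_search_in_values_to_retrieve_key (_code_name : String) (class_to_codes : List (String × List String)) : Prop :=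
  (class_to_codes.flatMap (fun kv => kv.2)).Nodup
instance (code_name : String) (class_to_codes : List (String × List String)) : Decidable (Pre_search_in_values_to_retrieve_key code_name class_to_codes) := by unfold Pre_search_in_values_to_retrieve_key; infer_instance

def pvWitness_search_in_values_to_retrieve_key : String × (List (String × List String)) :=
  ("A", [("urdu", ["ur", "urd"]), ("english", ["en"])])

def Spec_search_in_values_to_retrieve_key (code_name : String) (class_to_codes : List (String × List String)) (out : Option String) : Prop := out = search_in_values_to_retrieve_key_alt code_name class_to_codes
instance (code_name : String) (class_to_codes : List (String × List String)) (out : Option String) : Decidable (Spec_search_in_values_to_retrieve_key code_name class_to_codes out) := by unfold Spec_search_in_values_to_retrieve_key; infer_instance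

-- ===== CLAIM (what is proved, stated in full; the proofs are below) =====
def Claim_equal_search_in_values_to_retrieve_key : Prop := ∀ (code_name : String) (class_to_codes : List (String × List String)), Dom_search_in_values_to_retrieve_key code_name class_to_codes → Pre_search_in_values_to_retrieve_key code_name class_to_codes → Spec_search_in_values_to_retrieve_key code_name class_to_codes (search_in_values_to_retrieve_key code_name class_to_codes)

-- ===== LEMMAS AND PROOFS =====

-- inserting every code of one list with the same value
theorem pv_get_insert_all (k c : String) (codes : List String) (d : PySem.Dict String String) :
    (codes.foldl (fun d code => d.insert code k) d).get? c
      = if c ∈ codes then some k else d.get? c := by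
  induction codes generalizing d with
  | nil => simp
  | cons x xs ih =>
      simp only [List.foldl_cons, ih, PySem.Dict.get?_insert, List.mem_cons]
      by_cases hx : c = x <;> by_cases hm : c ∈ xs <;> simp [hx, hm]

theorem pv_scan_none (c : String) (l : List (String × List String))
    (h : c ∉ l.flatMap (fun kv => kv.2)) : pvScanA c l = none := by
  induction l with
  | nil => rfl
  | cons kv rest ih =>
      simp only [List.flatMap_cons, List.mem_append] at h
      push Not at h
      simp [pvScanA, h.1, ih h.2]

theorem pv_build_get (c : String) (l : List (String × List String)) (d : PySem.Dict String String)
    (h : (l.flatMap (fun kv => kv.2)).Nodup) :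
    (l.foldl (fun d kv => kv.2.foldl (fun d code => d.insert code kv.1) d) d).get? c
      = match pvScanA c l with
        | some k => some k
        | none => d.get? c := by
  induction l generalizing d with
  | nil => rfl
  | cons kv rest ih =>
      simp only [List.flatMap_cons, List.nodup_append] at h
      obtain ⟨_, hrest, hdisj⟩ := h
      simp only [List.foldl_cons]
      rw [ih _ hrest]
      by_cases hc : c ∈ kv.2
      · have : c ∉ rest.flatMap (fun kv => kv.2) := fun hm => hdisj c hc c hm rfl
        rw [pv_scan_none c rest this]
        simp [pvScanA, hc, pv_get_insert_all]
      · simp only [pvScanA, hc]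
        cases pvScanA c rest <;> simp [pv_get_insert_all, hc]

-- ===== VERDICT (by name: the statement is the Claim_ definition above) =====
theorem search_in_values_to_retrieve_key_spec : Claim_equal_search_in_values_to_retrieve_key := by
  intro code_name ctc _ hpre
  unfold Spec_search_in_values_to_retrieve_key search_in_values_to_retrieve_key
    search_in_values_to_retrieve_key_alt pvBuildInverse
  rw [pv_build_get _ _ _ hpre]
  cases pvScanA (PySem.Str.lower code_name) ctc <;> simp
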